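-- pv_equiv track=rewrite | github.com/recruit-tech/codable-model-optimizer | sample/usage/sample/sharing_clustering.py | calc_matching_score
-- ===== SOURCE A (Python) =====
-- def calc_matching_score(var_x, para_taxi_names, para_customers_age, para_customers_sex):
--     score = 0
--     for para_taxi_name in para_taxi_names:
--         customers_in_taxi = [(age, sex) for var_bit_x, age, sex
--                             in zip(var_x, para_customers_age, para_customers_sex)
--                             if var_bit_x == para_taxi_name]
--         num_in_taxi = len(customers_in_taxi)
--         if num_in_taxi > 1:
--             score += num_in_taxi - len(set([age for age, _ in customers_in_taxi]))
--             score += num_in_taxi - len(set([sex for _, sex in customers_in_taxi]))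
--
--     return score
-- ===== SOURCE B (Python) =====
-- def calc_matching_score(var_x, para_taxi_names, para_customers_age, para_customers_sex):
--     # One pass over customers maintaining, per taxi, a running (count, age-set, sex-set)
--     # summary; the penalty is then read off each taxi's summary directly, so the
--     # customer lists are never rescanned or even stored.
--     stats = {}
--     for x, age, sex in zip(var_x, para_customers_age, para_customers_sex):
--         n, ages, sexes = stats.get(x, (0, set(), set()))
--         stats[x] = (n + 1, ages | {age}, sexes | {sex})
--     return sum(2 * n - len(ages) - len(sexes)
--                for n, ages, sexes in (stats.get(t, (0, set(), set())) for t in para_taxi_names)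
--                if n > 1)
-- ===== Notes on version B (the rewrite author's own statement) =====
-- stated objective: faster
-- what changed: B replaces A's rescan of all customers for every taxi name by a single streaming pass that maintains per-taxi summary triples (count, distinct-age set, distinct-sex set) in a dict, then sums each taxi's penalty read directly from its summary.
import Mathlib
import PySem

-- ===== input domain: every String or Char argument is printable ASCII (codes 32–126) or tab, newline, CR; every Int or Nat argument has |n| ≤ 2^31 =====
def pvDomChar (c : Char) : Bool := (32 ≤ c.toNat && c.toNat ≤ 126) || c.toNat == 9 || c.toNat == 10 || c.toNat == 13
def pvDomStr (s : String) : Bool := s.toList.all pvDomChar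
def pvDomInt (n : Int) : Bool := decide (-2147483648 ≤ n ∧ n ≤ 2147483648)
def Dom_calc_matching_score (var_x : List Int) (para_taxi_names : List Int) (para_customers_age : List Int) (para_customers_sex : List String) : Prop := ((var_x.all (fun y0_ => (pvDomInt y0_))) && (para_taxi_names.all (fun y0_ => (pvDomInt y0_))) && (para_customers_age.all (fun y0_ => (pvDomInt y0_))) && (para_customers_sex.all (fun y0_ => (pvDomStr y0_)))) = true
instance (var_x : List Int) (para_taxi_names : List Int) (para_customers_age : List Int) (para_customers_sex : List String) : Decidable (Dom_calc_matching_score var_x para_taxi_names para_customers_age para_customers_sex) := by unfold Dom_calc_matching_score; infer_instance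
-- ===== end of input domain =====

-- B replaces A's rescan of all customers per taxi by one streaming pass that maintains
-- per-taxi summary triples (count, distinct-age set, distinct-sex set) (objective: faster).

-- ===== PORT A =====
def calc_matching_score (var_x : List Int) (para_taxi_names : List Int) (para_customers_age : List Int) (para_customers_sex : List String) : Int :=
  para_taxi_names.foldl (fun score para_taxi_name =>
    let customers_in_taxi :=
      ((var_x.zip (para_customers_age.zip para_customers_sex)).filter
        (fun p => p.1 == para_taxi_name)).map (fun p => p.2)
    let num_in_taxi : Int := customers_in_taxi.length
    if num_in_taxi > 1 then
      score + (num_in_taxi - ((PySem.Set.ofList (customers_in_taxi.map (fun c => c.1))).length : Int))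
            + (num_in_taxi - ((PySem.Set.ofList (customers_in_taxi.map (fun c => c.2))).length : Int))
    else score) 0

-- ===== PORT B =====
def calc_matching_score_alt (var_x : List Int) (para_taxi_names : List Int) (para_customers_age : List Int) (para_customers_sex : List String) : Int :=
  let stats : PySem.Dict Int (Int × PySem.Set Int × PySem.Set String) :=
    (var_x.zip (para_customers_age.zip para_customers_sex)).foldl
      (fun d q =>
        let s := d.getD q.1 (0, PySem.Set.empty, PySem.Set.empty)
        d.insert q.1 (s.1 + 1, s.2.1.add q.2.1, s.2.2.add q.2.2))
      PySem.Dict.empty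
  (para_taxi_names.map (fun t =>
    let s := stats.getD t (0, PySem.Set.empty, PySem.Set.empty)
    if s.1 > 1 then 2 * s.1 - (s.2.1.length : Int) - (s.2.2.length : Int) else 0)).sum

-- ===== PRECONDITION & SPEC =====
def Spec_calc_matching_score (var_x : List Int) (para_taxi_names : List Int) (para_customers_age : List Int) (para_customers_sex : List String) (out : Int) : Prop := out = calc_matching_score_alt var_x para_taxi_names para_customers_age para_customers_sex
instance (var_x : List Int) (para_taxi_names : List Int) (para_customers_age : List Int) (para_customers_sex : List String) (out : Int) : Decidable (Spec_calc_matching_score var_x para_taxi_names para_customers_age para_customers_sex out) := by unfold Spec_calc_matching_score; infer_instance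

-- ===== CLAIM (what is proved, stated in full; the proofs are below) =====
def Claim_equal_calc_matching_score : Prop := ∀ (var_x : List Int) (para_taxi_names : List Int) (para_customers_age : List Int) (para_customers_sex : List String), Dom_calc_matching_score var_x para_taxi_names para_customers_age para_customers_sex → Spec_calc_matching_score var_x para_taxi_names para_customers_age para_customers_sex (calc_matching_score var_x para_taxi_names para_customers_age para_customers_sex)

-- ===== LEMMAS AND PROOFS =====

-- The summary dict's entry at t is the fold of the summary step over the customers assigned to t.
theorem pv_build_getD (L : List (Int × (Int × String)))
    (d : PySem.Dict Int (Int × PySem.Set Int × PySem.Set String)) (t : Int) :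
    ((L.foldl (fun d q =>
        let s := d.getD q.1 (0, PySem.Set.empty, PySem.Set.empty)
        d.insert q.1 (s.1 + 1, s.2.1.add q.2.1, s.2.2.add q.2.2)) d).getD t
        (0, PySem.Set.empty, PySem.Set.empty))
      = (L.filter (fun q => q.1 == t)).foldl
          (fun s q => (s.1 + 1, s.2.1.add q.2.1, s.2.2.add q.2.2))
          (d.getD t (0, PySem.Set.empty, PySem.Set.empty)) := by
  induction L generalizing d with
  | nil => rfl
  | cons q L ih =>
      simp only [List.foldl_cons, List.filter_cons, ih, PySem.Dict.getD_insert]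
      by_cases h : q.1 = t
      · simp [h]
      · simp [h, Ne.symm h]

-- Folding the summary step over a list computes (count, distinct ages, distinct sexes).
theorem pv_summary (M : List (Int × (Int × String))) (s : Int × PySem.Set Int × PySem.Set String) :
    M.foldl (fun s q => (s.1 + 1, s.2.1.add q.2.1, s.2.2.add q.2.2)) s
      = (s.1 + M.length, PySem.Set.update s.2.1 (M.map (fun q => q.2.1)),
         PySem.Set.update s.2.2 (M.map (fun q => q.2.2))) := by
  induction M generalizing s with
  | nil => simp [PySem.Set.update]
  | cons q M ih =>
      simp only [List.foldl_cons, ih, List.map_cons, List.length_cons, PySem.Set.update]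
      refine Prod.ext ?_ (Prod.ext rfl rfl)
      push_cast; ring

-- ===== VERDICT (by name: the statement is the Claim_ definition above) =====
theorem calc_matching_score_spec : Claim_equal_calc_matching_score := by
  intro var_x para_taxi_names para_customers_age para_customers_sex hdom
  clear hdom
  unfold Spec_calc_matching_score calc_matching_score calc_matching_score_alt
  simp only
  induction para_taxi_names using List.reverseRecOn with
  | nil => rfl
  | append_singleton ts t ih =>
      rw [List.foldl_append, List.map_append, List.sum_append, ih]
      simp only [List.foldl_cons, List.foldl_nil, List.map_cons, List.map_nil,
        List.sum_cons, List.sum_nil, add_zero]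
      rw [pv_build_getD]
      simp only [PySem.Dict.getD_empty]
      rw [pv_summary]
      rw [show ∀ (l : List Int), PySem.Set.update PySem.Set.empty l = PySem.Set.ofList l from fun _ => rfl,
          show ∀ (l : List String), PySem.Set.update PySem.Set.empty l = PySem.Set.ofList l from fun _ => rfl]
      simp only [List.map_map, List.length_map, zero_add, Function.comp_def]
      split_ifs
      · ring
      · simp
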